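-- pv_equiv track=rewrite | github.com/andrew-garfield101/AoC_2023 | python/day04/solution.py | calculate_card_points
-- ===== SOURCE A (Python) =====
-- def calculate_card_points(winning_nums, player_nums):
--     matches = winning_nums.intersection(player_nums)
--     if not matches:
--         return 0
--     points = 1
--     for _ in range(1, len(matches)):
--         points *= 2
--     return points
-- ===== SOURCE B (Python) =====
-- def calculate_card_points(winning_nums, player_nums):
--     count = len(set(winning_nums) & set(player_nums))
--     return 0 if count == 0 else 1 << (count - 1)
-- ===== Notes on version B (the rewrite author's own statement) =====
-- stated objective: idiomatic
-- what changed: Replaces the doubling loop over range(1, len(matches)) by the closed form 1 << (count - 1) computed from the intersection size.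
import Mathlib
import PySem

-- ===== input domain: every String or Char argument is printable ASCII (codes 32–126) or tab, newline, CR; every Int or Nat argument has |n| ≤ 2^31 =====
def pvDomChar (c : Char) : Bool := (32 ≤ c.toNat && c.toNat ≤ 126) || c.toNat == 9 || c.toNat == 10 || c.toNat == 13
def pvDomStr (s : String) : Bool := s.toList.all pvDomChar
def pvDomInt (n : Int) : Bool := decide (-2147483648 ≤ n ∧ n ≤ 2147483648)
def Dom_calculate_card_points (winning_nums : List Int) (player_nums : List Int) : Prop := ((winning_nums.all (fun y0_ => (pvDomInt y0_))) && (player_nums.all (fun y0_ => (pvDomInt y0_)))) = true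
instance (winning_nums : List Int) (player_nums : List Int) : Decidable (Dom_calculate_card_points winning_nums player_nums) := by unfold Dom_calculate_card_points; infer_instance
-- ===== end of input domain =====

-- B replaces A's doubling loop by the closed form 1 << (count - 1) (idiomatic bit-shift formula).
-- ===== PORT A =====
def calculate_card_points (winning_nums : List Int) (player_nums : List Int) : Int :=
  let ms := PySem.Set.inter (PySem.Set.ofList winning_nums) player_nums
  if ms.isEmpty then 0
  else (PySem.List.pyRange 1 (ms.length : Int) 1).foldl (fun points _ => points * 2) 1

-- ===== PORT B =====
def calculate_card_points_alt (winning_nums : List Int) (player_nums : List Int) : Int :=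
  let count := (PySem.Set.inter (PySem.Set.ofList winning_nums) (PySem.Set.ofList player_nums)).length
  if count = 0 then 0 else 2 ^ (count - 1)

-- ===== PRECONDITION & SPEC =====
def Spec_calculate_card_points (winning_nums : List Int) (player_nums : List Int) (out : Int) : Prop := out = calculate_card_points_alt winning_nums player_nums
instance (winning_nums : List Int) (player_nums : List Int) (out : Int) : Decidable (Spec_calculate_card_points winning_nums player_nums out) := by unfold Spec_calculate_card_points; infer_instance

-- ===== CLAIM (what is proved, stated in full; the proofs are below) =====
def Claim_equal_calculate_card_points : Prop := ∀ (winning_nums : List Int) (player_nums : List Int), Dom_calculate_card_points winning_nums player_nums → Spec_calculate_card_points winning_nums player_nums (calculate_card_points winning_nums player_nums)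

-- ===== LEMMAS AND PROOFS =====

theorem foldl_double (l : List Int) (a : Int) :
    l.foldl (fun points _ => points * 2) a = a * 2 ^ l.length := by
  induction l generalizing a with
  | nil => simp
  | cons x xs ih => simp [List.foldl, ih, pow_succ]; ring

theorem inter_set_right (w p : List Int) :
    PySem.Set.inter (PySem.Set.ofList w) p
      = PySem.Set.inter (PySem.Set.ofList w) (PySem.Set.ofList p) := by
  apply List.filter_congr
  intro x _
  simp [PySem.Set.contains, PySem.Set.mem_ofList]

-- ===== VERDICT (by name: the statement is the Claim_ definition above) =====
theorem calculate_card_points_spec : Claim_equal_calculate_card_points := by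
  intro w p _
  unfold Spec_calculate_card_points calculate_card_points calculate_card_points_alt
  rw [inter_set_right]
  set m := PySem.Set.inter (PySem.Set.ofList w) (PySem.Set.ofList p) with hm
  by_cases h : m = []
  · simp [h]
  · have hlen : 0 < m.length := List.length_pos_iff.mpr h
    have hE : m.isEmpty = false := by simpa [List.isEmpty_iff] using h
    simp only [hE, Bool.false_eq_true, if_false, foldl_double, PySem.List.length_pyRange_one]
    have hc : m.length ≠ 0 := Nat.pos_iff_ne_zero.mp hlen
    simp only [hc, if_false]
    rw [one_mul]
    congr 1
    omega
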